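-- pv_equiv track=rewrite | github.com/mustafatoprak/PolynomialExercise | polynomialexercise/sources/PolynomialOperations.py | _check_if_params_smaller_or_greater_than_a_value
-- ===== SOURCE A (Python) =====
-- def _check_if_params_smaller_or_greater_than_a_value(params, value, operation="lt", type="all"):
--     """
--     Checks if all of the parameters are greater than, greater than or equal, less than, less than or equal.
--
--     Params
--     ------
--     params : list
--         list of parameters
--     value : int
--         value to compare parameter values
--     operation : str (default is lt)
--         comparison operation (lt: less than, lte: less than or equal, gt: greater than, gte: greater than or equal)
--     type : str (default is all)
--         if all of the parameters or any of the parameter should satisfy the requirement (options: all, any)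
--
--     Returns
--     -------
--     result : bool
--         True if all of the parameters satisfies the requirement, False otherwise
--     """
--     if operation == "lt":
--         if type == "all":
--             return True if all(param < value for param in params) else False
--         else:
--             return True if any(param < value for param in params) else False
--     elif operation == "lte":
--         if type == "all":
--             return True if all(param <= value for param in params) else False
--         else:
--             return True if any(param <= value for param in params) else False
--     elif operation == "gt":
--         if type == "all":
--             return True if all(param > value for param in params) else False
--         else:
--             return True if any(param > value for param in params) else False
--     elif operation == "gte":
--         if type == "all":
--             return True if all(param >= value for param in params) else False
--         else:
--             return True if any(param >= value for param in params) else False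
--     else:
--         raise ValueError("operation must be one of the followings: lt, lte, gt, gte!")
-- ===== SOURCE B (Python) =====
-- def _check_if_params_smaller_or_greater_than_a_value(params, value, operation="lt", type="all"):
--     if operation not in ("lt", "lte", "gt", "gte"):
--         raise ValueError("operation must be one of the followings: lt, lte, gt, gte!")
--     want_all = (type == "all")
--     if not params:
--         return want_all
--     smaller = operation in ("lt", "lte")
--     # Reduce the list to one extremal element: 'all smaller' is decided by the
--     # maximum, 'any smaller' by the minimum, and dually for the greater tests.
--     pivot = max(params) if smaller == want_all else min(params)
--     if operation == "lt":
--         return pivot < value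
--     if operation == "lte":
--         return pivot <= value
--     if operation == "gte":
--         return pivot >= value
--     return pivot > value
-- ===== Notes on version B (the rewrite author's own statement) =====
-- stated objective: alternative
-- what changed: Replaced the per-element all/any quantifier pass by a min/max reduction: the list is first reduced to the single extremal element that decides the quantified comparison (max for all-smaller / any-greater, min for any-smaller / all-greater), then one comparison against value gives the result; the empty list returns the quantifier identity.
import Mathlib
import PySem

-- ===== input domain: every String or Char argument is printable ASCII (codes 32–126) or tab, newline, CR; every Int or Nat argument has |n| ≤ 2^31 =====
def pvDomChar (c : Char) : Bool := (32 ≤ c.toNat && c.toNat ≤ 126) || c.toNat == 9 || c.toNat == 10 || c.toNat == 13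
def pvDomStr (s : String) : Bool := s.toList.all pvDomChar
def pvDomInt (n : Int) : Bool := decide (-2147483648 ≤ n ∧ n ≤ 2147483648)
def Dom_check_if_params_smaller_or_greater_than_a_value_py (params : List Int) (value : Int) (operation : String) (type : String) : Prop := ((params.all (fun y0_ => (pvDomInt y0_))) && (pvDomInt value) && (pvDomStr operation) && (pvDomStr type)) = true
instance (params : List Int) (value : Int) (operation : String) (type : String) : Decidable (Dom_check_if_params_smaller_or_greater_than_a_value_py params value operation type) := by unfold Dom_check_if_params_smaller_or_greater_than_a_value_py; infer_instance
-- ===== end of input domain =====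

-- B: instead of a per-element all/any pass, reduce the list to one extremal element
-- (min or max) and decide with a single comparison; alternative algorithm, same cost.


-- ===== PORT A =====
-- Port of A: the if/elif chain, branch for branch. In the final branch A raises
-- ValueError; those inputs are excluded by Pre_ below (the port returns false there).
def check_if_params_smaller_or_greater_than_a_value_py (params : List Int) (value : Int) (operation : String) (type : String) : Bool :=
  if operation == "lt" then
    (if type == "all" then (if params.all (fun param => param < value) then true else false)
     else (if params.any (fun param => param < value) then true else false))
  else if operation == "lte" then
    (if type == "all" then (if params.all (fun param => param ≤ value) then true else false)
     else (if params.any (fun param => param ≤ value) then true else false))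
  else if operation == "gt" then
    (if type == "all" then (if params.all (fun param => param > value) then true else false)
     else (if params.any (fun param => param > value) then true else false))
  else if operation == "gte" then
    (if type == "all" then (if params.all (fun param => param ≥ value) then true else false)
     else (if params.any (fun param => param ≥ value) then true else false))
  else false  -- raise ValueError(...)

-- ===== PORT B =====
-- Port of B: min/max reduction. Python's max(params)/min(params) on a nonempty list
-- is ported as the fold of max/min over the list. Unknown operations raise in B
-- (outside Pre_; the port returns false there).
def check_if_params_smaller_or_greater_than_a_value_py_alt (params : List Int) (value : Int) (operation : String) (type : String) : Bool :=
  if !(operation == "lt" || operation == "lte" || operation == "gt" || operation == "gte") then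
    false  -- raise ValueError(...)
  else
    let want_all := type == "all"
    match params with
    | [] => want_all
    | p :: ps =>
      let smaller := operation == "lt" || operation == "lte"
      let pivot := if smaller == want_all then ps.foldl max p else ps.foldl min p
      if operation == "lt" then pivot < value
      else if operation == "lte" then pivot ≤ value
      else if operation == "gte" then pivot ≥ value
      else pivot > value

-- ===== PRECONDITION & SPEC =====
-- Pre_ excludes exactly the unknown operations, on which both Pythons raise ValueError.
def Pre_check_if_params_smaller_or_greater_than_a_value_py (params : List Int) (value : Int) (operation : String) (type : String) : Prop :=
  operation = "lt" ∨ operation = "lte" ∨ operation = "gt" ∨ operation = "gte"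
instance (params : List Int) (value : Int) (operation : String) (type : String) : Decidable (Pre_check_if_params_smaller_or_greater_than_a_value_py params value operation type) := by unfold Pre_check_if_params_smaller_or_greater_than_a_value_py; infer_instance
def pvWitness_check_if_params_smaller_or_greater_than_a_value_py : List Int × Int × String × String := ([1, 2], 2, "lt", "all")
def Spec_check_if_params_smaller_or_greater_than_a_value_py (params : List Int) (value : Int) (operation : String) (type : String) (out : Bool) : Prop := out = check_if_params_smaller_or_greater_than_a_value_py_alt params value operation type
instance (params : List Int) (value : Int) (operation : String) (type : String) (out : Bool) : Decidable (Spec_check_if_params_smaller_or_greater_than_a_value_py params value operation type out) := by unfold Spec_check_if_params_smaller_or_greater_than_a_value_py; infer_instance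

-- ===== CLAIM (what is proved, stated in full; the proofs are below) =====
def Claim_equal_check_if_params_smaller_or_greater_than_a_value_py : Prop := ∀ (params : List Int) (value : Int) (operation : String) (type : String), Dom_check_if_params_smaller_or_greater_than_a_value_py params value operation type → Pre_check_if_params_smaller_or_greater_than_a_value_py params value operation type → Spec_check_if_params_smaller_or_greater_than_a_value_py params value operation type (check_if_params_smaller_or_greater_than_a_value_py params value operation type)

-- ===== LEMMAS AND PROOFS =====
-- The fold of max/min characterises the quantified comparison over the list.
theorem fmax_lt (l : List Int) (a v : Int) : (l.foldl max a < v) ↔ (a < v ∧ ∀ x ∈ l, x < v) := by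
  induction l generalizing a with
  | nil => simp
  | cons q l ih => simp [List.foldl_cons, ih]; tauto

theorem fmax_le (l : List Int) (a v : Int) : (l.foldl max a ≤ v) ↔ (a ≤ v ∧ ∀ x ∈ l, x ≤ v) := by
  induction l generalizing a with
  | nil => simp
  | cons q l ih => simp [List.foldl_cons, ih]; tauto

theorem fmin_gt (l : List Int) (a v : Int) : (v < l.foldl min a) ↔ (v < a ∧ ∀ x ∈ l, v < x) := by
  induction l generalizing a with
  | nil => simp
  | cons q l ih => simp [List.foldl_cons, ih]; tauto

theorem fmin_ge (l : List Int) (a v : Int) : (v ≤ l.foldl min a) ↔ (v ≤ a ∧ ∀ x ∈ l, v ≤ x) := by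
  induction l generalizing a with
  | nil => simp
  | cons q l ih => simp [List.foldl_cons, ih]; tauto

theorem fmin_lt (l : List Int) (a v : Int) : (l.foldl min a < v) ↔ (a < v ∨ ∃ x ∈ l, x < v) := by
  induction l generalizing a with
  | nil => simp
  | cons q l ih => simp [List.foldl_cons, ih]; tauto

theorem fmin_le (l : List Int) (a v : Int) : (l.foldl min a ≤ v) ↔ (a ≤ v ∨ ∃ x ∈ l, x ≤ v) := by
  induction l generalizing a with
  | nil => simp
  | cons q l ih => simp [List.foldl_cons, ih]; tauto

theorem fmax_gt (l : List Int) (a v : Int) : (v < l.foldl max a) ↔ (v < a ∨ ∃ x ∈ l, v < x) := by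
  induction l generalizing a with
  | nil => simp
  | cons q l ih => simp [List.foldl_cons, ih]; tauto

theorem fmax_ge (l : List Int) (a v : Int) : (v ≤ l.foldl max a) ↔ (v ≤ a ∨ ∃ x ∈ l, v ≤ x) := by
  induction l generalizing a with
  | nil => simp
  | cons q l ih => simp [List.foldl_cons, ih]; tauto

-- ===== VERDICT (by name: the statement is the Claim_ definition above) =====
theorem check_if_params_smaller_or_greater_than_a_value_py_spec : Claim_equal_check_if_params_smaller_or_greater_than_a_value_py := by
  intro params value operation type _ hpre
  unfold Spec_check_if_params_smaller_or_greater_than_a_value_py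
  rcases hpre with h | h | h | h <;> subst h <;>
    cases params <;> by_cases ht : type = "all" <;>
      simp_all [check_if_params_smaller_or_greater_than_a_value_py,
                check_if_params_smaller_or_greater_than_a_value_py_alt,
                fmax_lt, fmax_le, fmin_gt, fmin_ge, fmin_lt, fmin_le, fmax_gt, fmax_ge]
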